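-- pv_equiv track=rewrite | github.com/calico-team/calico-fa23 | benga/submissions/accepted/benga_optimized.py | matmul
-- ===== SOURCE A (Python) =====
-- A = [
--     [2, 0, 1, 0, 1, 0, 0, 0, 0, 0, 0, 1, 0, 1, 1, 0, 1],
--     [1, 0, 0, 0, 0, 0, 0, 0, 0, 0, 0, 0, 0, 0, 1, 0, 0],
--     [0, 1, 0, 0, 0, 0, 0, 0, 0, 0, 0, 0, 0, 0, 0, 1, 0],
--     [1, 0, 0, 0, 0, 0, 0, 0, 0, 0, 0, 1, 0, 0, 0, 0, 0],
--     [0, 0, 0, 1, 0, 0, 0, 0, 0, 0, 0, 0, 1, 0, 0, 0, 0],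
--     [1, 0, 0, 0, 1, 0, 0, 0, 0, 0, 0, 0, 0, 0, 0, 0, 0],
--     [1, 0, 0, 0, 0, 0, 0, 0, 0, 0, 0, 0, 0, 0, 0, 0, 0],
--     [0, 0, 0, 1, 0, 0, 0, 0, 0, 0, 0, 0, 0, 0, 0, 0, 0],
--     [1, 0, 1, 0, 0, 0, 0, 0, 0, 0, 0, 0, 0, 0, 0, 0, 0],
--     [1, 0, 0, 0, 0, 0, 0, 0, 0, 0, 0, 0, 0, 0, 0, 0, 0],
--     [0, 1, 0, 0, 0, 0, 0, 0, 0, 0, 0, 0, 0, 0, 0, 0, 0],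
--     [0, 0, 0, 0, 0, 1, 0, 1, 0, 0, 0, 0, 0, 0, 0, 0, 0],
--     [0, 0, 0, 0, 0, 1, 0, 0, 0, 0, 0, 0, 0, 0, 0, 0, 0],
--     [0, 0, 0, 0, 0, 0, 1, 0, 0, 0, 0, 0, 0, 0, 0, 0, 0],
--     [0, 0, 0, 0, 0, 0, 0, 0, 1, 0, 1, 0, 0, 0, 0, 0, 0],
--     [0, 0, 0, 0, 0, 0, 0, 0, 1, 0, 0, 0, 0, 0, 0, 0, 0],
--     [0, 0, 0, 0, 0, 0, 0, 0, 0, 1, 0, 0, 0, 0, 0, 0, 0],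
-- ]
--
-- def matmul(A, A_dim, B, B_dim, mod):
--     A_rows, A_cols = A_dim
--     B_rows, B_cols = B_dim
--     AB_rows, AB_cols = A_rows, B_cols
--
--     return [
--         sum(
--             A[A_cols * i + k] * B[B_cols * k + j]
--             for k in range(A_cols)
--         ) % mod
--         for i in range(AB_rows)
--         for j in range(AB_cols)
--     ]
-- ===== SOURCE B (Python) =====
-- def matmul(A, A_dim, B, B_dim, mod):
--     A_rows, A_cols = A_dim
--     B_rows, B_cols = B_dim
--     rows, ks, cols = range(A_rows), range(A_cols), range(B_cols)
--
--     result = [0] * (len(rows) * len(cols))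
--     if not result:
--         return result
--     for i in rows:
--         for k in ks:
--             a = A[A_cols * i + k]
--             row_off, b_off = B_cols * i, B_cols * k
--             for j in cols:
--                 result[row_off + j] += a * B[b_off + j]
--     return [v % mod for v in result]
-- ===== Notes on version B (the rewrite author's own statement) =====
-- stated objective: alternative
-- what changed: B replaces A's per-entry generator-expression dot products (one independent k-scan per output cell) by a flat pre-allocated accumulator array swept once in i,k,j order with each A entry fetched once per (i,k) and a single mod pass at the end.
import Mathlib
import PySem

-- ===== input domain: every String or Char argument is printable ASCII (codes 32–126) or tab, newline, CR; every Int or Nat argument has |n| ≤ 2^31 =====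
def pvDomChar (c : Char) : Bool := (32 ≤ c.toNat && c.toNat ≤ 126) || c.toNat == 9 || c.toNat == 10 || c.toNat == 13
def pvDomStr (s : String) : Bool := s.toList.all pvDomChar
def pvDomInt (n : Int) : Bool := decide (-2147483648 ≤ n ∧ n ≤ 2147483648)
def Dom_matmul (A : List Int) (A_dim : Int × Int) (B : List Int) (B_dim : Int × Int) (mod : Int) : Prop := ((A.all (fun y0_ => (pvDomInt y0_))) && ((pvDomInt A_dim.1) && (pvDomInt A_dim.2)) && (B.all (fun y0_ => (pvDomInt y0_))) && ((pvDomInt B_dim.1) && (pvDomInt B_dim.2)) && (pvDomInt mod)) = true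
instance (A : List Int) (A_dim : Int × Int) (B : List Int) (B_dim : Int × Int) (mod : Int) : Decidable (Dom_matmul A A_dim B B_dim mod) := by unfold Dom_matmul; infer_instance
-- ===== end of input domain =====

-- B replaces A's per-entry generator-sum dot products by one flat accumulator array swept
-- in i,k,j order (each A entry fetched once per row of B), reducing mod once at the end;
-- objective: alternative decomposition, equal return value. RETURN value equivalence only.

-- ===== PORT A =====
def matmul (A : List Int) (A_dim : Int × Int) (B : List Int) (B_dim : Int × Int) (mod : Int) : List Int :=
  let A_rows := A_dim.1
  let A_cols := A_dim.2
  let B_cols := B_dim.2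
  (PySem.List.pyRange 0 A_rows 1).flatMap (fun i =>
    (PySem.List.pyRange 0 B_cols 1).map (fun j =>
      PySem.Int.mod
        (((PySem.List.pyRange 0 A_cols 1).map (fun k =>
            PySem.List.pyGetD A (A_cols * i + k) 0 * PySem.List.pyGetD B (B_cols * k + j) 0)).sum)
        mod))

-- ===== PORT B =====
def matmul_alt (A : List Int) (A_dim : Int × Int) (B : List Int) (B_dim : Int × Int) (mod : Int) : List Int :=
  let A_rows := A_dim.1
  let A_cols := A_dim.2
  let B_cols := B_dim.2
  let result0 : List Int := List.replicate (A_rows.toNat * B_cols.toNat) 0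
  if result0 = [] then result0
  else
    let result := (PySem.List.pyRange 0 A_rows 1).foldl (fun res i =>
      (PySem.List.pyRange 0 A_cols 1).foldl (fun res k =>
        let a := PySem.List.pyGetD A (A_cols * i + k) 0
        let rowOff := B_cols * i
        let bOff := B_cols * k
        (PySem.List.pyRange 0 B_cols 1).foldl (fun res j =>
          PySem.List.pySetD res (rowOff + j)
            (PySem.List.pyGetD res (rowOff + j) 0 + a * PySem.List.pyGetD B (bOff + j) 0)) res) res) result0
    result.map (fun v => PySem.Int.mod v mod)

-- ===== PRECONDITION & SPEC =====
-- Pre_ excludes exactly the inputs where the Python A raises: mod = 0 with a nonempty output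
-- (ZeroDivisionError) or a required A/B index out of range (IndexError); A returns everywhere else.
def Pre_matmul (A : List Int) (A_dim : Int × Int) (B : List Int) (B_dim : Int × Int) (mod : Int) : Prop :=
  0 < A_dim.1 → 0 < B_dim.2 →
    (mod ≠ 0 ∧ (0 < A_dim.2 →
      (A_dim.2 * (A_dim.1 - 1) + (A_dim.2 - 1) < (A.length : Int) ∧
       B_dim.2 * (A_dim.2 - 1) + (B_dim.2 - 1) < (B.length : Int))))
instance (A : List Int) (A_dim : Int × Int) (B : List Int) (B_dim : Int × Int) (mod : Int) : Decidable (Pre_matmul A A_dim B B_dim mod) := by unfold Pre_matmul; infer_instance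

def pvWitness_matmul : List Int × (Int × Int) × List Int × (Int × Int) × Int :=
  ([1, 2, 3, 4], (2, 2), [5, 6, 7, 8], (2, 2), 10)

def Spec_matmul (A : List Int) (A_dim : Int × Int) (B : List Int) (B_dim : Int × Int) (mod : Int) (out : List Int) : Prop := out = matmul_alt A A_dim B B_dim mod
instance (A : List Int) (A_dim : Int × Int) (B : List Int) (B_dim : Int × Int) (mod : Int) (out : List Int) : Decidable (Spec_matmul A A_dim B B_dim mod out) := by unfold Spec_matmul; infer_instance

-- ===== CLAIM (what is proved, stated in full; the proofs are below) =====
def Claim_equal_matmul : Prop := ∀ (A : List Int) (A_dim : Int × Int) (B : List Int) (B_dim : Int × Int) (mod : Int), Dom_matmul A A_dim B B_dim mod → Pre_matmul A A_dim B B_dim mod → Spec_matmul A A_dim B B_dim mod (matmul A A_dim B B_dim mod)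

-- ===== LEMMAS AND PROOFS =====

-- the common meeting form: entry (i,j) of the product, over Nat indices
def pvEntry (A B : List Int) (an cn : Nat) (i j : Nat) : Int :=
  ((List.range an).map (fun k => A.getD (an * i + k) 0 * B.getD (cn * k + j) 0)).sum

lemma pv_len_flat {α : Type} (R C : Nat) (f : Nat → Nat → α) :
    ((List.range R).flatMap (fun i => (List.range C).map (f i))).length = R * C := by
  simp [List.length_flatMap, List.map_const', List.sum_replicate]

lemma pv_getElem_flat {α : Type} (R C n : Nat) (f : Nat → Nat → α) (hn : n < R * C) :
    ((List.range R).flatMap (fun i => (List.range C).map (f i)))[n]? = some (f (n / C) (n % C)) := by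
  induction R with
  | zero => omega
  | succ R ih =>
    have hsm : (R + 1) * C = R * C + C := Nat.succ_mul R C
    rw [List.range_succ, List.flatMap_append]
    by_cases hlt : n < R * C
    · rw [List.getElem?_append_left (by rw [pv_len_flat]; exact hlt)]
      exact ih hlt
    · rw [List.getElem?_append_right (by rw [pv_len_flat]; omega)]
      simp only [pv_len_flat, List.flatMap_cons, List.flatMap_nil, List.append_nil]
      have h1 : n / C = R := Nat.div_eq_of_lt_le (by omega) (by omega)
      have hdm := Nat.div_add_mod n C
      rw [h1] at hdm
      have hcm : C * R = R * C := Nat.mul_comm C R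
      have h2 : n % C = n - R * C := by omega
      rw [List.getElem?_map, List.getElem?_range (by omega), h1, h2]
      rfl

lemma pv_foldl_set_length (L : List (Nat × Int)) (res : List Int) :
    (L.foldl (fun r p => r.set p.1 (r.getD p.1 0 + p.2)) res).length = res.length := by
  induction L generalizing res with
  | nil => rfl
  | cons p L ih => rw [List.foldl_cons, ih, List.length_set]

lemma pv_foldl_set_getD (L : List (Nat × Int)) (res : List Int) (s : Nat) (hs : s < res.length) :
    (L.foldl (fun r p => r.set p.1 (r.getD p.1 0 + p.2)) res).getD s 0
      = res.getD s 0 + ((L.filter (fun p => p.1 == s)).map Prod.snd).sum := by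
  induction L generalizing res with
  | nil => simp
  | cons p L ih =>
    rw [List.foldl_cons, ih _ (by simpa using hs)]
    by_cases hps : p.1 = s
    · subst hps
      have hset : (res.set p.1 (res.getD p.1 0 + p.2)).getD p.1 0 = res.getD p.1 0 + p.2 := by
        rw [List.getD_eq_getElem _ _ (by simpa using hs), List.getElem_set_self]
      rw [hset, List.filter_cons_of_pos (by simp), List.map_cons, List.sum_cons]
      ring
    · have hset : (res.set p.1 (res.getD p.1 0 + p.2)).getD s 0 = res.getD s 0 := by
        rw [List.getD_eq_getElem _ _ (by simpa using hs), List.getD_eq_getElem _ _ hs]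
        exact List.getElem_set_ne hps _
      rw [hset, List.filter_cons_of_neg (by simp [hps])]

lemma pv_flatMap_single {α β : Type} (l : List α) (g : α → List β) (a0 : α)
    (h0 : a0 ∈ l) (hnd : l.Nodup) (h : ∀ a ∈ l, a ≠ a0 → g a = []) :
    l.flatMap g = g a0 := by
  induction l with
  | nil => cases h0
  | cons x l ih =>
    rw [List.flatMap_cons]
    rcases List.mem_cons.mp h0 with h1 | h1
    · subst h1
      have : l.flatMap g = [] := by
        apply List.flatMap_eq_nil_iff.mpr
        intro a ha
        exact h a (by simp [ha]) (fun he => (List.nodup_cons.mp hnd).1 (he ▸ ha))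
      simp [this]
    · have hx : g x = [] := h x (by simp) (fun he => (List.nodup_cons.mp hnd).1 (he ▸ h1))
      rw [hx, List.nil_append]
      exact ih h1 (List.nodup_cons.mp hnd).2 (fun a ha => h a (by simp [ha]))

lemma pv_matmul_flat (A : List Int) (A_dim : Int × Int) (B : List Int) (B_dim : Int × Int) (mod : Int) :
    matmul A A_dim B B_dim mod
      = (List.range A_dim.1.toNat).flatMap (fun i => (List.range B_dim.2.toNat).map (fun j =>
          PySem.Int.mod (pvEntry A B A_dim.2.toNat B_dim.2.toNat i j) mod)) := by
  unfold matmul pvEntry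
  simp only [PySem.List.pyRange_zero, List.flatMap_map, List.map_map, Function.comp_def]
  apply List.flatMap_congr
  intro i hi
  apply List.map_congr_left
  intro j hj
  have hj' := List.mem_range.mp hj
  obtain ⟨cn, hcn⟩ : ∃ cn : Nat, B_dim.2 = (cn : Int) := ⟨B_dim.2.toNat, by omega⟩
  congr 1
  apply congrArg
  apply List.map_congr_left
  intro k hk
  have hk' := List.mem_range.mp hk
  obtain ⟨an, han⟩ : ∃ an : Nat, A_dim.2 = (an : Int) := ⟨A_dim.2.toNat, by omega⟩
  rw [han, hcn]
  simp only [Int.toNat_natCast]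
  have e1 : (an : Int) * ↑i + ↑k = ((an * i + k : Nat) : Int) := by push_cast; ring
  have e2 : (cn : Int) * ↑k + ↑j = ((cn * k + j : Nat) : Int) := by push_cast; ring
  rw [e1, e2, PySem.List.pyGetD_natCast, PySem.List.pyGetD_natCast]

-- the flattened update stream of B's triple loop, over Nat indices
def pvUpds (A B : List Int) (an cn rn : Nat) : List (Nat × Int) :=
  (List.range rn).flatMap (fun i => (List.range an).flatMap (fun k =>
    (List.range cn).map (fun j => (cn * i + j, A.getD (an * i + k) 0 * B.getD (cn * k + j) 0))))

lemma pv_loops_eq (A B : List Int) (ac : Int) (rn cn : Nat) (res : List Int) :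
    (List.range rn).foldl (fun (res : List Int) (i : Nat) =>
      (List.range ac.toNat).foldl (fun (res : List Int) (k : Nat) =>
        (List.range cn).foldl (fun (res : List Int) (j : Nat) =>
          PySem.List.pySetD res ((cn : Int) * (i : Int) + (j : Int))
            (PySem.List.pyGetD res ((cn : Int) * (i : Int) + (j : Int)) 0 +
              PySem.List.pyGetD A (ac * (i : Int) + (k : Int)) 0 *
                PySem.List.pyGetD B ((cn : Int) * (k : Int) + (j : Int)) 0)) res) res) res
    = (pvUpds A B ac.toNat cn rn).foldl (fun r p => r.set p.1 (r.getD p.1 0 + p.2)) res := by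
  unfold pvUpds
  rw [List.foldl_flatMap]
  apply PySem.List.foldl_congr_mem
  intro res0 i _
  rw [List.foldl_flatMap]
  apply PySem.List.foldl_congr_mem
  intro res1 k hk
  rw [List.foldl_map]
  apply PySem.List.foldl_congr_mem
  intro res2 j _
  have hk' := List.mem_range.mp hk
  obtain ⟨an, han⟩ : ∃ an : Nat, ac = (an : Int) := ⟨ac.toNat, by omega⟩
  rw [han]
  simp only [Int.toNat_natCast]
  have e1 : (cn : Int) * ↑i + ↑j = ((cn * i + j : Nat) : Int) := by push_cast; ring
  have e2 : (an : Int) * ↑i + ↑k = ((an * i + k : Nat) : Int) := by push_cast; ring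
  have e3 : (cn : Int) * ↑k + ↑j = ((cn * k + j : Nat) : Int) := by push_cast; ring
  rw [e1, e2, e3, PySem.List.pySetD_natCast, PySem.List.pyGetD_natCast, PySem.List.pyGetD_natCast,
    PySem.List.pyGetD_natCast]

lemma pv_filter_sum (A B : List Int) (an cn rn n : Nat) (hcn : 0 < cn) (hn : n < rn * cn) :
    (((pvUpds A B an cn rn).filter (fun p => p.1 == n)).map Prod.snd).sum
      = pvEntry A B an cn (n / cn) (n % cn) := by
  unfold pvUpds
  simp only [List.filter_flatMap, List.filter_map, Function.comp_def]
  rw [pv_flatMap_single _ _ (n / cn)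
    (List.mem_range.mpr (Nat.div_lt_of_lt_mul (by rw [Nat.mul_comm]; exact hn)))
    (List.nodup_range)]
  · have hj0 : (List.range cn).filter (fun j => cn * (n / cn) + j == n) = [n % cn] := by
      rw [List.filter_congr (q := fun j => j == n % cn)]
      · rw [List.filter_beq, List.count_range]
        simp [Nat.mod_lt _ hcn]
      · intro j hj
        have hj' := List.mem_range.mp hj
        have hdm := Nat.div_add_mod n cn
        rw [Bool.eq_iff_iff]
        simp only [beq_iff_eq]
        omega
    rw [hj0]
    unfold pvEntry
    simp only [List.map_cons, List.map_nil, ← List.map_eq_flatMap, List.map_map, Function.comp_def]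
  · intro i hi hne
    apply List.flatMap_eq_nil_iff.mpr
    intro k _
    have hfil : (List.range cn).filter (fun j => cn * i + j == n) = [] := by
      apply List.filter_eq_nil_iff.mpr
      intro j hj
      have hj' := List.mem_range.mp hj
      simp only [beq_iff_eq]
      intro he
      apply hne
      have hdiv : (cn * i + j) / cn = i := by
        rw [Nat.mul_add_div hcn, Nat.div_eq_of_lt hj']
        omega
      rw [he] at hdiv
      omega
    rw [hfil, List.map_nil]

lemma pv_matmul_alt_flat (A : List Int) (A_dim : Int × Int) (B : List Int) (B_dim : Int × Int) (mod : Int) :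
    matmul_alt A A_dim B B_dim mod
      = (List.range A_dim.1.toNat).flatMap (fun i => (List.range B_dim.2.toNat).map (fun j =>
          PySem.Int.mod (pvEntry A B A_dim.2.toNat B_dim.2.toNat i j) mod)) := by
  simp only [matmul_alt]
  by_cases h0 : A_dim.1.toNat * B_dim.2.toNat = 0
  · rw [h0]
    simp only [List.replicate_zero]
    symm
    apply List.flatMap_eq_nil_iff.mpr
    intro i hi
    have hi' := List.mem_range.mp hi
    have hcz : B_dim.2.toNat = 0 := by
      rcases Nat.mul_eq_zero.mp h0 with h | h
      · omega
      · exact h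
    rw [hcz]
    simp
  · rw [if_neg (by rw [List.replicate_eq_nil_iff]; exact h0)]
    have hne := Nat.mul_ne_zero_iff.mp h0
    obtain ⟨rn, hrn⟩ : ∃ rn : Nat, A_dim.1 = (rn : Int) := ⟨A_dim.1.toNat, by have := hne.1; omega⟩
    obtain ⟨cn, hcn⟩ : ∃ cn : Nat, B_dim.2 = (cn : Int) := ⟨B_dim.2.toNat, by have := hne.2; omega⟩
    have hcnpos : 0 < cn := by
      have h2 := hne.2
      rw [hcn] at h2
      simp only [Int.toNat_natCast] at h2
      omega
    rw [hrn, hcn]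
    simp only [Int.toNat_natCast, PySem.List.pyRange_zero, List.foldl_map]
    rw [hrn, hcn] at h0
    simp only [Int.toNat_natCast] at h0
    rw [pv_loops_eq A B A_dim.2 rn cn]
    apply List.ext_getElem?
    intro n
    have hlenF : ((pvUpds A B A_dim.2.toNat cn rn).foldl (fun r p => r.set p.1 (r.getD p.1 0 + p.2))
        (List.replicate (rn * cn) 0)).length = rn * cn := by
      rw [pv_foldl_set_length, List.length_replicate]
    by_cases hn : n < rn * cn
    · rw [List.getElem?_map, List.getElem?_eq_getElem (by rw [hlenF]; exact hn),
        pv_getElem_flat rn cn n _ hn]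
      simp only [Option.map_some, Option.some.injEq]
      congr 1
      rw [← List.getD_eq_getElem _ 0 (by rw [hlenF]; exact hn),
        pv_foldl_set_getD _ _ _ (by rw [List.length_replicate]; exact hn),
        pv_filter_sum A B A_dim.2.toNat cn rn n hcnpos hn]
      simp [List.getD_eq_getElem?_getD, hn]
    · rw [List.getElem?_eq_none (by rw [List.length_map, hlenF]; omega),
        List.getElem?_eq_none (by rw [pv_len_flat]; omega)]

-- ===== VERDICT (by name: the statement is the Claim_ definition above) =====
theorem matmul_spec : Claim_equal_matmul := by
  intro A A_dim B B_dim mod _ _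
  unfold Spec_matmul
  rw [pv_matmul_flat, pv_matmul_alt_flat]
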